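-- pv_equiv track=rewrite | github.com/xtnenu/scggcn | Dataprocess.py | mask2bools
-- ===== SOURCE A (Python) =====
-- def mask2bools(tr,te,length):
--     trlst=[]
--     telst=[]
--     for i in range(length):
--
--         if i in tr:
--             trlst.append(True)
--             telst.append(False)
--         elif i in te:
--             trlst.append(False)
--             telst.append(True)
--         else:
--             trlst.append(False)
--             telst.append(False)
--     return trlst,telst
-- ===== SOURCE B (Python) =====
-- def mask2bools(tr, te, length):
--     trlst = [False] * length
--     telst = [False] * length
--     for idx in tr:
--         if 0 <= idx < length:
--             trlst[idx] = True
--     for idx in te: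
--         if 0 <= idx < length and idx not in tr:
--             telst[idx] = True
--     return trlst, telst
-- ===== Notes on version B (the rewrite author's own statement) =====
-- stated objective: faster
-- what changed: Instead of scanning every index 0..length-1 with 'in tr'/'in te' membership tests, B preallocates two all-False lists and scatters True at the positions listed in tr and te (te guarded by 'not in tr' to keep train precedence and by bounds to ignore out-of-range indices, as A does).
import Mathlib
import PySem

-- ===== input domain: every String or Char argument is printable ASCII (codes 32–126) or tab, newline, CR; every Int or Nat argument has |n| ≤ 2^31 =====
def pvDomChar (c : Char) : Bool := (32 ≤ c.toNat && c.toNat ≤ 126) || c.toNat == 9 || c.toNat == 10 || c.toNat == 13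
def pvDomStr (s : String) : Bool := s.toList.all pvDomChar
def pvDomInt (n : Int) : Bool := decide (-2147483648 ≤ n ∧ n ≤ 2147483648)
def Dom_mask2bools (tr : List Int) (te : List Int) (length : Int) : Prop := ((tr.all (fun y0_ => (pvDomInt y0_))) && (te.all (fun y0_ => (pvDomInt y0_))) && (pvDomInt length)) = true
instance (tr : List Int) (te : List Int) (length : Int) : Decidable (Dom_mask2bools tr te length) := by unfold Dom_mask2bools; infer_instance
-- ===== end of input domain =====

-- B replaces A's full-range scan with membership tests by preallocating all-False masks
-- and scattering True at the (in-range) indices listed in tr / te; return values proved equal.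


-- ===== PORT A =====
-- for i in range(length): append to both lists according to 'i in tr' / 'i in te'
def mask2bools (tr : List Int) (te : List Int) (length : Int) : List Bool × List Bool :=
  (PySem.List.pyRange 0 length 1).foldl
    (fun (st : List Bool × List Bool) i =>
      if i ∈ tr then (st.1 ++ [true], st.2 ++ [false])
      else if i ∈ te then (st.1 ++ [false], st.2 ++ [true])
      else (st.1 ++ [false], st.2 ++ [false]))
    ([], [])

-- ===== PORT B =====
-- trlst[idx] = True  (the guard 0 <= idx < length makes List.set in range, as in Source B)
def pvScatter (P : Int → Prop) [DecidablePred P] (xs : List Bool) (idx : Int) : List Bool :=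
  if P idx then xs.set idx.toNat true else xs

-- [False]*length, then scatter True at in-range indices of tr; same for te, skipping tr's
def mask2bools_alt (tr : List Int) (te : List Int) (length : Int) : List Bool × List Bool :=
  let trlst := tr.foldl (pvScatter (fun idx => 0 ≤ idx ∧ idx < length)) (List.replicate length.toNat false)
  let telst := te.foldl (pvScatter (fun idx => (0 ≤ idx ∧ idx < length) ∧ idx ∉ tr)) (List.replicate length.toNat false)
  (trlst, telst)

-- ===== PRECONDITION & SPEC =====
def Spec_mask2bools (tr : List Int) (te : List Int) (length : Int) (out : List Bool × List Bool) : Prop := out = mask2bools_alt tr te length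
instance (tr : List Int) (te : List Int) (length : Int) (out : List Bool × List Bool) : Decidable (Spec_mask2bools tr te length out) := by unfold Spec_mask2bools; infer_instance

-- ===== CLAIM (what is proved, stated in full; the proofs are below) =====
def Claim_equal_mask2bools : Prop := ∀ (tr : List Int) (te : List Int) (length : Int), Dom_mask2bools tr te length → Spec_mask2bools tr te length (mask2bools tr te length)

-- ===== LEMMAS AND PROOFS =====

-- A's fold appends one element per i: it is the pair of maps over the range
theorem pvFoldA (tr te : List Int) :
    ∀ (l : List Int) (a b : List Bool),
      l.foldl
        (fun (st : List Bool × List Bool) i =>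
          if i ∈ tr then (st.1 ++ [true], st.2 ++ [false])
          else if i ∈ te then (st.1 ++ [false], st.2 ++ [true])
          else (st.1 ++ [false], st.2 ++ [false])) (a, b)
      = (a ++ l.map (fun i => decide (i ∈ tr)),
         b ++ l.map (fun i => !decide (i ∈ tr) && decide (i ∈ te))) := by
  intro l
  induction l with
  | nil => simp
  | cons x xs ih =>
    intro a b
    by_cases hx : x ∈ tr
    · simp [List.foldl_cons, hx, ih]
    · by_cases hx' : x ∈ te <;> simp [List.foldl_cons, hx, hx', ih]

theorem pvScatter_length (P : Int → Prop) [DecidablePred P] (xs : List Bool) (idx : Int) :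
    (pvScatter P xs idx).length = xs.length := by
  unfold pvScatter; split <;> simp

theorem pvScatterFold_length (P : Int → Prop) [DecidablePred P] :
    ∀ (idxs : List Int) (xs : List Bool), (idxs.foldl (pvScatter P) xs).length = xs.length := by
  intro idxs
  induction idxs with
  | nil => simp
  | cons x xs ih => intro ys; simp [List.foldl_cons, ih, pvScatter_length]

theorem pvScatterFold_get (P : Int → Prop) [DecidablePred P] (n : Nat)
    (hP : ∀ i, P i → 0 ≤ i ∧ i < (n : Int)) :
    ∀ (idxs : List Int) (xs : List Bool) (hx : xs.length = n) (k : Nat) (hk : k < n),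
      (idxs.foldl (pvScatter P) xs)[k]'(by rw [pvScatterFold_length, hx]; exact hk)
        = (xs[k]'(by omega) || (decide (P (k : Int)) && decide ((k : Int) ∈ idxs))) := by
  intro idxs
  induction idxs with
  | nil => intro xs hx k hk; simp
  | cons x rest ih =>
    intro xs hx k hk
    have hstep : (pvScatter P xs x)[k]'(by rw [pvScatter_length, hx]; exact hk)
        = (xs[k]'(by omega) || (decide (P (k : Int)) && decide ((k : Int) = x))) := by
      by_cases hPx : P x
      · have hb := hP x hPx
        have hxk : x.toNat < xs.length := by omega
        simp only [pvScatter, if_pos hPx]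
        rw [List.getElem_set]
        by_cases he : x.toNat = k
        · have : (k : Int) = x := by omega
          simp [he, this, hPx]
        · have : ¬ ((k : Int) = x) := by omega
          simp [he, this]
      · simp only [pvScatter, if_neg hPx]
        by_cases he : (k : Int) = x
        · have : ¬ P (k : Int) := by rw [he]; exact hPx
          simp [he, hPx]
        · simp [he]
    simp only [List.foldl_cons]
    rw [ih (pvScatter P xs x) (by rw [pvScatter_length, hx]) k hk, hstep]
    simp only [List.mem_cons, Bool.decide_or]
    rw [Bool.or_assoc, ← Bool.and_or_distrib_left]

theorem pvCast_lt {k : Nat} {L : Int} (h : k < L.toNat) : (k : Int) < L := by omega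

theorem mask2bools_eq (tr te : List Int) (length : Int) :
    mask2bools tr te length = mask2bools_alt tr te length := by
  unfold mask2bools mask2bools_alt
  rw [PySem.List.pyRange_one, pvFoldA]
  simp only [List.nil_append]
  refine Prod.ext ?_ ?_
  · apply List.ext_getElem
    · simp [pvScatterFold_length]
    · intro k h1 h2
      have hk : k < length.toNat := by
        rw [pvScatterFold_length] at h2; simpa using h2
      rw [pvScatterFold_get (fun idx => 0 ≤ idx ∧ idx < length) length.toNat
          (by intro i hi; omega) tr _ (by simp) k hk]
      have hkP : (0 ≤ (k : Int) ∧ (k : Int) < length) := ⟨by omega, pvCast_lt hk⟩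
      simp [hkP.1, hkP.2, List.getElem_replicate]
  · apply List.ext_getElem
    · simp [pvScatterFold_length]
    · intro k h1 h2
      have hk : k < length.toNat := by
        rw [pvScatterFold_length] at h2; simpa using h2
      rw [pvScatterFold_get (fun idx => (0 ≤ idx ∧ idx < length) ∧ idx ∉ tr) length.toNat
          (by intro i hi; omega) te _ (by simp) k hk]
      have hkb : (0 ≤ (k : Int) ∧ (k : Int) < length) := ⟨by omega, pvCast_lt hk⟩
      by_cases htr : (k : Int) ∈ tr <;> by_cases hte : (k : Int) ∈ te <;>
        simp [hkb.1, hkb.2, htr, hte, List.getElem_replicate]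

-- ===== VERDICT (by name: the statement is the Claim_ definition above) =====
theorem mask2bools_spec : Claim_equal_mask2bools := by
  intro tr te length _
  unfold Spec_mask2bools
  exact mask2bools_eq tr te length
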